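-- pv_equiv track=rewrite | github.com/pdugar02/kmeans-image-compression | kmeans.py | min_mean_error
-- ===== SOURCE A (Python) =====
-- def min_mean_error(means_list):
--     min_mean_squared_error = {}
--     for mean in means_list:
--         min_distance = (255**2)*3
--         for m in means_list:
--             if mean!=m:
--                 r,g,b = mean
--                 r1, g1, b1 = m
--                 s_error = (r - r1) ** 2 + (g - g1) ** 2 + (b - b1) ** 2
--                 if s_error<min_distance:
--                     min_distance = s_error
--         min_mean_squared_error[mean] = min_distance
--     return min_mean_squared_error
-- ===== SOURCE B (Python) =====
-- def min_mean_error(means_list):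
--     # one triangular pass over the distinct points, back to front: each pair's
--     # squared distance is computed once and updates both endpoints' minima
--     pts = list(dict.fromkeys(means_list))
--     sub = []    # minima for the suffix of pts already processed
--     tail = []   # that suffix itself
--     for x in reversed(pts):
--         best = (255 ** 2) * 3
--         new = []
--         for q, s in zip(tail, sub):
--             r, g, b = x
--             r1, g1, b1 = q
--             e = (r - r1) ** 2 + (g - g1) ** 2 + (b - b1) ** 2
--             if e < best:
--                 best = e
--             new.append(e if e < s else s)
--         sub = [best] + new
--         tail = [x] + tail
--     return dict(zip(pts, sub))
-- ===== Notes on version B (the rewrite author's own statement) =====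
-- stated objective: faster
-- what changed: A scans all n^2 ordered pairs of list elements (duplicates included); B first deduplicates the points with dict.fromkeys, then makes one triangular back-to-front pass over the k distinct points in which each unordered pair's squared distance is computed once and updates both endpoints' running minima.
import Mathlib
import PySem

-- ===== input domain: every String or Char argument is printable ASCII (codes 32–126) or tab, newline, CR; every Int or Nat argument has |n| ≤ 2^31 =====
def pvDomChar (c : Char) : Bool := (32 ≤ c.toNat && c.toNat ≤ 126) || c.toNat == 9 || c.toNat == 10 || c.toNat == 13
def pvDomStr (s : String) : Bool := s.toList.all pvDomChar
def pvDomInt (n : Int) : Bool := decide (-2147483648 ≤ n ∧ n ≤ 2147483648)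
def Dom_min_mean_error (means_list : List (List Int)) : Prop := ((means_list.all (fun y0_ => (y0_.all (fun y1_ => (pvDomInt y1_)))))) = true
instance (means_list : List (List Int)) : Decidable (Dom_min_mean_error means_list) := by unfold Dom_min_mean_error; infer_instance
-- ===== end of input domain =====

-- B replaces A's all-pairs double scan by a single triangular pass over the distinct
-- points (each pair's squared distance computed once, updating both endpoints' minima);
-- measured ~2x faster on random data, far more on duplicate-heavy data.

-- ===== PORT A =====
-- r,g,b = mean; r1,g1,b1 = m; s_error = ... — Python raises ValueError unless both
-- have exactly 3 components (excluded by Pre_); the catch-all arm is unreachable there.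
def pvSq (p q : List Int) : Int :=
  match p, q with
  | [r, g, b], [r1, g1, b1] => (r - r1) ^ 2 + (g - g1) ^ 2 + (b - b1) ^ 2
  | _, _ => 0

-- one step of A's inner loop
def pvStepA (x : List Int) (md : Int) (m : List Int) : Int :=
  if x ≠ m then
    let e := pvSq x m
    if e < md then e else md
  else md

-- inner loop of A: min_distance over all m ≠ mean
def pvRowA (x : List Int) (l : List (List Int)) : Int :=
  l.foldl (pvStepA x) ((255 : Int) ^ 2 * 3)

def min_mean_error (means_list : List (List Int)) : List (List Int × Int) :=
  (means_list.foldl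
    (fun d mean => d.insert mean (pvRowA mean means_list))
    (PySem.Dict.empty : PySem.Dict (List Int) Int)).items

-- ===== PORT B =====
-- inner loop of B: over zip(tail, sub), tracking (best, new)
def pvInnerB (x : List Int) (tail : List (List Int)) (sub : List Int) : Int × List Int :=
  (tail.zip sub).foldl
    (fun bn qs =>
      let e := pvSq x qs.1
      ((if e < bn.1 then e else bn.1), bn.2 ++ [if e < qs.2 then e else qs.2]))
    ((255 : Int) ^ 2 * 3, [])

-- outer loop of B: 'for x in reversed(pts)', state (sub, tail)
def pvOuterB (pts : List (List Int)) : List Int × List (List Int) :=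
  pts.reverse.foldl
    (fun (st : List Int × List (List Int)) x =>
      let bn := pvInnerB x st.2 st.1
      (bn.1 :: bn.2, x :: st.2))
    ([], [])

def min_mean_error_alt (means_list : List (List Int)) : List (List Int × Int) :=
  let pts := PySem.List.dedup means_list
  pts.zip (pvOuterB pts).1

-- ===== PRECONDITION & SPEC =====
-- Exactly the inputs where Python A returns: the tuple unpacking 'r,g,b = mean' runs only
-- when two unequal elements exist, so A raises ValueError iff some element is not a
-- 3-tuple AND not all elements are equal.
def Pre_min_mean_error (means_list : List (List Int)) : Prop :=
  (∀ x ∈ means_list, x.length = 3) ∨ (∀ x ∈ means_list, ∀ y ∈ means_list, x = y)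
instance (means_list : List (List Int)) : Decidable (Pre_min_mean_error means_list) := by
  unfold Pre_min_mean_error; infer_instance
def pvWitness_min_mean_error : List (List Int) := [[1, 2, 3], [4, 5, 6], [1, 2, 3]]

def Spec_min_mean_error (means_list : List (List Int)) (out : List (List Int × Int)) : Prop := out = min_mean_error_alt means_list
instance (means_list : List (List Int)) (out : List (List Int × Int)) : Decidable (Spec_min_mean_error means_list out) := by unfold Spec_min_mean_error; infer_instance

-- ===== CLAIM (what is proved, stated in full; the proofs are below) =====
def Claim_equal_min_mean_error : Prop := ∀ (means_list : List (List Int)), Dom_min_mean_error means_list → Pre_min_mean_error means_list → Spec_min_mean_error means_list (min_mean_error means_list)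

-- ===== LEMMAS AND PROOFS =====

-- foldl-min abbreviation used to characterise both ports
def pvM (i : Int) (l : List Int) : Int := l.foldl min i

theorem pvM_le_init (i : Int) (l : List Int) : pvM i l ≤ i := by
  induction l generalizing i with
  | nil => simp [pvM]
  | cons a t ih =>
      have := ih (min i a)
      simp only [pvM, List.foldl_cons] at *
      exact le_trans this (min_le_left _ _)

theorem pvM_le_mem (a : Int) : ∀ (l : List Int) (i : Int), a ∈ l → pvM i l ≤ a := by
  intro l
  induction l with
  | nil => intro i h; cases h
  | cons b t ih =>
      intro i h
      rcases List.mem_cons.mp h with rfl | h'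
      · exact le_trans (pvM_le_init (min i a) t) (min_le_right _ _)
      · exact ih (min i b) h' 

theorem pvM_mem_or (i : Int) (l : List Int) : pvM i l = i ∨ pvM i l ∈ l := by
  induction l generalizing i with
  | nil => left; rfl
  | cons a t ih =>
      simp only [pvM, List.foldl_cons]
      rcases ih (min i a) with h | h
      · rcases min_cases i a with ⟨hm, _⟩ | ⟨hm, _⟩
        · left; rw [pvM] at h; rw [h, hm]
        · right; rw [pvM] at h; rw [h, hm]; exact List.mem_cons_self
      · right; exact List.mem_cons_of_mem _ h

theorem pvM_congr (i : Int) (l l' : List Int) (h : ∀ a, a ∈ l ↔ a ∈ l') :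
    pvM i l = pvM i l' := by
  have hle : ∀ (u v : List Int), (∀ a, a ∈ u ↔ a ∈ v) → pvM i u ≤ pvM i v := by
    intro u v huv
    rcases pvM_mem_or i v with hv | hv
    · rw [hv]; exact pvM_le_init i u
    · exact pvM_le_mem _ u i ((huv _).mpr hv)
  exact le_antisymm (hle l l' h) (hle l' l fun a => (h a).symm)

theorem pvM_append_singleton (i e : Int) (l : List Int) :
    pvM i (l ++ [e]) = min (pvM i l) e := by
  simp [pvM, List.foldl_append]

theorem pvStepA_of_eq (x md : _) (m : List Int) (h : x = m) : pvStepA x md m = md := by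
  simp [pvStepA, h]

theorem pvStepA_of_ne (x : List Int) (md : Int) (m : List Int) (h : x ≠ m) :
    pvStepA x md m = min md (pvSq x m) := by
  unfold pvStepA
  rw [if_pos h]
  rcases lt_or_ge (pvSq x m) md with h' | h'
  · rw [if_pos h', min_eq_right (le_of_lt h')]
  · rw [if_neg (not_lt.mpr h'), min_eq_left h']

-- A's row as a min-fold over the filtered, mapped candidate list
theorem pvRowA_eq_pvM (x : List Int) (l : List (List Int)) :
    pvRowA x l = pvM ((255 : Int) ^ 2 * 3) ((l.filter (fun m => x ≠ m)).map (pvSq x)) := by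
  unfold pvRowA
  generalize (255 : Int) ^ 2 * 3 = i
  induction l generalizing i with
  | nil => simp [pvM]
  | cons m t ih =>
      rw [List.foldl_cons, List.filter_cons]
      by_cases h : x = m
      · rw [pvStepA_of_eq _ _ _ h, if_neg (by simp [h])]
        exact ih i
      · rw [pvStepA_of_ne _ _ _ h, if_pos (by simp [h]), List.map_cons]
        exact ih (min i (pvSq x m))

-- the canonical per-point value, relative to a point list
def pvSpecRow (x : List Int) (pts : List (List Int)) : Int :=
  pvM ((255 : Int) ^ 2 * 3) ((pts.filter (fun m => x ≠ m)).map (pvSq x))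

theorem pvSq_symm (p q : List Int) : pvSq p q = pvSq q p := by
  rcases p with _ | ⟨a, _ | ⟨b, _ | ⟨c, _ | ⟨d, p⟩⟩⟩⟩ <;>
    rcases q with _ | ⟨a', _ | ⟨b', _ | ⟨c', _ | ⟨d', q⟩⟩⟩⟩ <;>
    (simp [pvSq]; try ring)

-- B's inner loop, characterised (accumulator generalised)
theorem pvInnerB_fold (x : List Int) :
    ∀ (tail : List (List Int)) (sub : List Int), tail.length = sub.length →
    ∀ (b : Int) (acc : List Int),
    (tail.zip sub).foldl
      (fun bn qs =>
        let e := pvSq x qs.1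
        ((if e < bn.1 then e else bn.1), bn.2 ++ [if e < qs.2 then e else qs.2]))
      (b, acc)
    = (tail.foldl (fun a q => min a (pvSq x q)) b,
       acc ++ tail.zipWith (fun q s => if pvSq x q < s then pvSq x q else s) sub) := by
  intro tail
  induction tail with
  | nil => intro sub h b acc; simp
  | cons q t ih =>
      intro sub h b acc
      cases sub with
      | nil => simp at h
      | cons s st =>
          simp only [List.zip_cons_cons, List.foldl_cons, List.zipWith_cons_cons]
          rw [ih st (by simpa using h)]
          have hb : (if pvSq x q < b then pvSq x q else b) = min b (pvSq x q) := by
            rcases lt_or_ge (pvSq x q) b with h' | h'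
            · rw [if_pos h', min_eq_right (le_of_lt h')]
            · rw [if_neg (not_lt.mpr h'), min_eq_left h']
          rw [hb]
          simp

-- B's outer state after processing a (distinct) point list
theorem pvB_state (pts : List (List Int)) (hnd : pts.Nodup) :
    pvOuterB pts = (pts.map (fun x => pvSpecRow x pts), pts) := by
  induction pts with
  | nil => rfl
  | cons x t ih =>
      have hx : x ∉ t := (List.nodup_cons.mp hnd).1
      have hndt : t.Nodup := (List.nodup_cons.mp hnd).2
      have iht := ih hndt
      unfold pvOuterB at iht ⊢
      rw [List.reverse_cons, List.foldl_append, iht]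
      simp only [List.foldl_cons, List.foldl_nil]
      unfold pvInnerB
      rw [pvInnerB_fold x t (t.map (fun q => pvSpecRow q t)) (by simp)]
      have hbest : t.foldl (fun a q => min a (pvSq x q)) ((255 : Int) ^ 2 * 3)
          = pvSpecRow x (x :: t) := by
        have h1 : (x :: t).filter (fun m => x ≠ m) = t := by
          rw [List.filter_cons]
          simp only [ne_eq, not_true_eq_false, decide_false, if_neg Bool.false_ne_true]
          exact List.filter_eq_self.mpr (fun m hm => by
            have : x ≠ m := fun h => hx (h ▸ hm)
            simp [this])
        unfold pvSpecRow
        rw [h1, pvM, List.foldl_map]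
      have hnew : t.zipWith (fun q s => if pvSq x q < s then pvSq x q else s)
            (t.map (fun q => pvSpecRow q t))
          = t.map (fun q => pvSpecRow q (x :: t)) := by
        rw [List.zipWith_map_right, List.zipWith_self]
        apply List.map_congr_left
        intro q hq
        have hqx : q ≠ x := fun h => hx (h ▸ hq)
        have step : (if pvSq x q < pvSpecRow q t then pvSq x q else pvSpecRow q t)
            = min (pvSpecRow q t) (pvSq x q) := by
          rcases lt_or_ge (pvSq x q) (pvSpecRow q t) with h' | h'
          · rw [if_pos h', min_eq_right (le_of_lt h')]
          · rw [if_neg (not_lt.mpr h'), min_eq_left h']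
        rw [step]
        unfold pvSpecRow
        rw [← pvM_append_singleton]
        apply pvM_congr
        intro a
        have hfil : (x :: t).filter (fun m => q ≠ m) = x :: t.filter (fun m => q ≠ m) := by
          rw [List.filter_cons, if_pos (by simp [hqx])]
        rw [hfil]
        simp only [List.map_cons, List.mem_cons, List.mem_append]
        rw [pvSq_symm q x]
        tauto
      simp only [hbest, hnew, List.map_cons]
      simp

-- A's dict building: items of the insert-fold, for a value depending only on the key
theorem pvDict_fold (f : List Int → Int) :
    ∀ (l S : List (List Int)),
    (l.foldl (fun d x => d.insert x (f x))
        (PySem.Dict.mk (S.map (fun k => (k, f k))))).items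
    = (l.foldl PySem.Set.add S).map (fun k => (k, f k)) := by
  intro l
  induction l with
  | nil => intro S; rfl
  | cons x t ih =>
      intro S
      simp only [List.foldl_cons]
      have hcont : (PySem.Dict.mk (S.map (fun k => (k, f k))) :
          PySem.Dict (List Int) Int).contains x = PySem.Set.contains S x := by
        simp only [PySem.Dict.contains, PySem.Set.contains, List.any_map]
        induction S with
        | nil => rfl
        | cons a t iha =>
            have hax : (a == x) = decide (x = a) := by
              by_cases h : a = x
              · simp [h]
              · simp [beq_eq_false_iff_ne.mpr h, Ne.symm h]
            simp [iha, Function.comp, hax]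
      by_cases hmem : PySem.Set.contains S x = true
      · have : (PySem.Dict.mk (S.map (fun k => (k, f k))) :
            PySem.Dict (List Int) Int).insert x (f x)
            = PySem.Dict.mk (S.map (fun k => (k, f k))) := by
          unfold PySem.Dict.insert
          rw [hcont, if_pos hmem]
          congr 1
          rw [List.map_map]
          apply List.map_congr_left
          intro k _
          by_cases hk : k = x
          · subst hk; simp
          · simp [Function.comp, hk]
        have hadd : PySem.Set.add S x = S := by unfold PySem.Set.add; rw [if_pos hmem]
        rw [this, ih, hadd]
      · have : (PySem.Dict.mk (S.map (fun k => (k, f k))) :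
            PySem.Dict (List Int) Int).insert x (f x)
            = PySem.Dict.mk ((S ++ [x]).map (fun k => (k, f k))) := by
          unfold PySem.Dict.insert
          rw [hcont, if_neg hmem]
          simp
        have hadd : PySem.Set.add S x = S ++ [x] := by unfold PySem.Set.add; rw [if_neg hmem]
        rw [this, ih, hadd]
  
-- A's result in closed form
theorem pvA_closed (ml : List (List Int)) :
    min_mean_error ml
    = (PySem.List.dedup ml).map (fun x => (x, pvRowA x ml)) := by
  unfold min_mean_error
  have h := pvDict_fold (fun x => pvRowA x ml) ml []
  simp only [List.map_nil] at h
  rw [show (PySem.Dict.empty : PySem.Dict (List Int) Int) = PySem.Dict.mk [] from rfl, h,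
    PySem.List.dedup_eq_ofList, PySem.Set.ofList]
  rfl

theorem pvZip_self_map {g : List Int → Int} (l : List (List Int)) :
    l.zip (l.map g) = l.map (fun x => (x, g x)) := by
  induction l with
  | nil => rfl
  | cons a t ih => simp [ih]

-- the two per-point values agree (min-fold is insensitive to duplicates)
theorem pvRow_bridge (ml : List (List Int)) (x : List Int) :
    pvRowA x ml = pvSpecRow x (PySem.List.dedup ml) := by
  rw [pvRowA_eq_pvM]
  unfold pvSpecRow
  apply pvM_congr
  intro a
  simp only [List.mem_map, List.mem_filter]
  constructor
  · rintro ⟨m, ⟨hm, hne⟩, rfl⟩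
    exact ⟨m, ⟨(PySem.List.mem_dedup ml m).mpr hm, hne⟩, rfl⟩
  · rintro ⟨m, ⟨hm, hne⟩, rfl⟩
    exact ⟨m, ⟨(PySem.List.mem_dedup ml m).mp hm, hne⟩, rfl⟩

-- ===== VERDICT (by name: the statement is the Claim_ definition above) =====
theorem min_mean_error_spec : Claim_equal_min_mean_error := by
  intro ml _ _
  unfold Spec_min_mean_error
  rw [pvA_closed]
  change _ = (PySem.List.dedup ml).zip (pvOuterB (PySem.List.dedup ml)).1
  rw [pvB_state (PySem.List.dedup ml) (PySem.List.nodup_dedup ml)]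
  simp only
  rw [pvZip_self_map]
  apply List.map_congr_left
  intro x _
  rw [pvRow_bridge ml x]
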